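-- pv_equiv track=rewrite | github.com/koii-network/prometheus-beta | src/remove_even_numbers.py | remove_even_numbers
-- ===== SOURCE A (Python) =====
-- def remove_even_numbers(numbers):
--     """
--     Remove even numbers from an input array and return their sum.
--
--     Args:
--         numbers (list): Input list of integers
--
--     Returns:
--         tuple: A tuple containing:
--             - A list of odd numbers from the original list
--             - The sum of removed even numbers
--     """
--     if not isinstance(numbers, list):
--         raise TypeError("Input must be a list")
--
--     even_sum = 0
--     odd_numbers = []
--
--     for num in numbers:
--         if not isinstance(num, int):
--             raise TypeError("All elements must be integers")
--
--         if num % 2 == 0: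
--             even_sum += num
--         else:
--             odd_numbers.append(num)
--
--     return odd_numbers, even_sum
-- ===== SOURCE B (Python) =====
-- def remove_even_numbers(numbers):
--     if not isinstance(numbers, list):
--         raise TypeError("Input must be a list")
--     for num in numbers:
--         if not isinstance(num, int):
--             raise TypeError("All elements must be integers")
--     odd_numbers = [n for n in numbers if n % 2]
--     return odd_numbers, sum(numbers) - sum(odd_numbers)
-- ===== Notes on version B (the rewrite author's own statement) =====
-- stated objective: alternative
-- what changed: B filters odd numbers in one comprehension and derives the even sum as sum(numbers) - sum(odd_numbers), instead of A's single loop accumulating the even sum and appending odds.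
import Mathlib
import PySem

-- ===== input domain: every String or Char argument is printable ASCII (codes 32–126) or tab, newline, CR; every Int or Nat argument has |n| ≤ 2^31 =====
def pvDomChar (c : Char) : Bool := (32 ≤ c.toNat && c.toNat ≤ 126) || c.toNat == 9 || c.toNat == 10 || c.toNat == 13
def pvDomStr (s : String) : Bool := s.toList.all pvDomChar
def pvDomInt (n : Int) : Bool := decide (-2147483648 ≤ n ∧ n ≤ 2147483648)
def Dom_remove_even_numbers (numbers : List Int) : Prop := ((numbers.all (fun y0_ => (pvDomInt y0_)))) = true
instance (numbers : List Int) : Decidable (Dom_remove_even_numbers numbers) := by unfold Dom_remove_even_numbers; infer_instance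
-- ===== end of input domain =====

-- B replaces A's single accumulating loop by an odd-filter plus even_sum = sum(numbers) - sum(odds); alternative decomposition, same cost.

-- ===== PORT A =====
-- A's loop over numbers carrying (even_sum, odd_numbers); odd_numbers is built by append, as in Python.
def remove_even_numbers (numbers : List Int) : List Int × Int :=
  let st := numbers.foldl
    (fun (st : Int × List Int) num =>
      if PySem.Int.mod num 2 == 0 then (st.1 + num, st.2)
      else (st.1, st.2 ++ [num]))
    (0, [])
  (st.2, st.1)

-- ===== PORT B =====
-- B: one filter for the odds ('n % 2' truthy), then sum(numbers) - sum(odd_numbers).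
def remove_even_numbers_alt (numbers : List Int) : List Int × Int :=
  let odd_numbers := numbers.filter (fun n => PySem.Int.mod n 2 != 0)
  (odd_numbers, numbers.sum - odd_numbers.sum)

-- ===== PRECONDITION & SPEC =====
def Spec_remove_even_numbers (numbers : List Int) (out : List Int × Int) : Prop := out = remove_even_numbers_alt numbers
instance (numbers : List Int) (out : List Int × Int) : Decidable (Spec_remove_even_numbers numbers out) := by unfold Spec_remove_even_numbers; infer_instance

-- ===== CLAIM (what is proved, stated in full; the proofs are below) =====
def Claim_equal_remove_even_numbers : Prop := ∀ (numbers : List Int), Dom_remove_even_numbers numbers → Spec_remove_even_numbers numbers (remove_even_numbers numbers)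

-- ===== LEMMAS AND PROOFS =====

theorem rem_foldl_inv (numbers : List Int) (s : Int) (acc : List Int) :
    numbers.foldl
      (fun (st : Int × List Int) num =>
        if PySem.Int.mod num 2 == 0 then (st.1 + num, st.2)
        else (st.1, st.2 ++ [num]))
      (s, acc)
    = (s + (numbers.sum - (numbers.filter (fun n => PySem.Int.mod n 2 != 0)).sum),
       acc ++ numbers.filter (fun n => PySem.Int.mod n 2 != 0)) := by
  induction numbers generalizing s acc with
  | nil => simp
  | cons x xs ih =>
    simp only [List.foldl_cons, List.filter_cons]
    by_cases h : PySem.Int.mod x 2 == 0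
    · simp only [h]
      have h' : (PySem.Int.mod x 2 != 0) = false := by simp [bne]; simp [PySem.Int.mod, Int.fmod_eq_emod] at h ⊢; omega
      rw [h', ih]
      simp [List.sum_cons]; ring
    · rw [if_neg (by simpa using h)]
      have h' : (PySem.Int.mod x 2 != 0) = true := by simp [bne]; simp [PySem.Int.mod, Int.fmod_eq_emod] at h ⊢; omega
      rw [h', ih]
      simp [List.sum_cons]

-- ===== VERDICT (by name: the statement is the Claim_ definition above) =====
theorem remove_even_numbers_spec : Claim_equal_remove_even_numbers := by
  intro numbers _
  unfold Spec_remove_even_numbers remove_even_numbers remove_even_numbers_alt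
  rw [rem_foldl_inv]
  simp
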